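-- pv_equiv track=rewrite | github.com/bajaco/algorithm | farmers.py | get_days_of_power
-- ===== SOURCE A (Python) =====
-- def get_days_of_power(R1,D1,R2,D2,R3,D3,k):
--
--     # Not necessary, but for readability
--     loans = [
--             {'day': D1, 'rate': R1},
--             {'day': D2, 'rate': R2},
--             {'day': D3, 'rate': R3}
--     ]
--
--     rate = 0
--     today = 0
--     days_on = 0
--     while k >= rate:
--
--         # removes loans if their rates have been added to prevent unnecessary checks
--         for loan in loans[:]:
--             if today == loan['day']:
--                 rate += loan['rate']
--                 loans.remove(loan)
--
--         # k must afford the rate, and the rate must be greater than 0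
--         if rate > 0:
--             k -= rate
--             days_on += 1
--
--         # increment day
--         today += 1
--
--     return days_on
-- ===== SOURCE B (Python) =====
-- def get_days_of_power(R1, D1, R2, D2, R3, D3, k):
--     # Event-driven closed form: process the (at most 3) loan activations in
--     # day order; within each constant-rate stretch the number of affordable
--     # days is a single floor division instead of a day-by-day loop.
--     # On inputs where A's while-loop never terminates (budget k >= 0 survives
--     # every ramp-up segment and the eventual total rate is <= 0) this raises
--     # ValueError instead of looping forever.
--     if k < 0:
--         return 0
--     events = sorted((p for p in ((D1, R1), (D2, R2), (D3, R3)) if p[0] >= 0), key=lambda p: p[0])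
--     days_on = 0
--     start = 0
--     rate = 0
--     for day, r in events:
--         length = day - start
--         if length > 0 and rate > 0:
--             j = max(1, k // rate)
--             if j <= length:
--                 return days_on + j
--             days_on += length
--             k -= length * rate
--         elif length > 0 and k < rate:
--             return days_on
--         rate += r
--         start = day
--     if rate > 0:
--         return days_on + max(1, k // rate)
--     if k < rate:
--         return days_on
--     raise ValueError("the budget is never exhausted: the simulation would not terminate")
-- ===== Notes on version B (the rewrite author's own statement) =====
-- stated objective: faster
-- what changed: Replaces A's day-by-day simulation (one loop iteration per simulated day, rescanning and mutating the loan list each day) by an event-driven closed form: the at most 3 loan activations are sorted by day and the number of affordable days inside each constant-rate stretch is computed with a single floor division; Pre_ excludes exactly the inputs on which A's while-loop never terminates (there B raises ValueError).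
import Mathlib
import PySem

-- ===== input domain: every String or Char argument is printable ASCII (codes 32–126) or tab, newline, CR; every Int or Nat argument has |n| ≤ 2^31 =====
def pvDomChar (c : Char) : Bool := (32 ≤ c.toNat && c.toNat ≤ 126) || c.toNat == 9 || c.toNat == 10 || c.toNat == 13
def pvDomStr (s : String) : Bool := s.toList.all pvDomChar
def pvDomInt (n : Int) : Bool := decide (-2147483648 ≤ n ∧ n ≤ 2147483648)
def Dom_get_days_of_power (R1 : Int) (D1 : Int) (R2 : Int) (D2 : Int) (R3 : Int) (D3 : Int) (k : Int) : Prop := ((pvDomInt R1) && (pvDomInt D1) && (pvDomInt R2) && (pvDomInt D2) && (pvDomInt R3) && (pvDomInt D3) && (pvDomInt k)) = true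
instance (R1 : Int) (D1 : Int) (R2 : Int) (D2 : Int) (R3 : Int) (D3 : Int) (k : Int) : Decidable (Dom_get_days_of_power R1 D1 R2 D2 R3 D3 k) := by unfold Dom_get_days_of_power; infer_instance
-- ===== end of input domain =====

-- B replaces A's day-by-day simulation by an event-driven closed form (one floor
-- division per constant-rate stretch between the at most 3 loan activations).

-- ===== PORT A =====
-- the `for loan in loans[:]: ... loans.remove(loan)` pass: fold over a COPY of the
-- list while the accumulator carries the mutated (rate, loans) state, exactly as Python does
def aActivate (loans : List (Int × Int)) (today : Int) (rate : Int) : Int × List (Int × Int) :=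
  List.foldl
    (fun s loan =>
      if today = loan.1 then (s.1 + loan.2, ((PySem.List.remove? s.2 loan).getD s.2)) else s)
    (rate, loans) loans

-- the `while k >= rate` loop; the fuel only makes the recursion total: inside
-- Pre_ the loop terminates long before 2^40 iterations (proved below)
def aLoop : Nat → List (Int × Int) → Int → Int → Int → Int → Int
  | 0, _, _, _, days_on, _ => days_on
  | fuel + 1, loans, rate, today, days_on, k =>
    if rate ≤ k then
      let s := aActivate loans today rate
      if 0 < s.1 then aLoop fuel s.2 s.1 (today + 1) (days_on + 1) (k - s.1)
      else aLoop fuel s.2 s.1 (today + 1) days_on k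
    else days_on

def get_days_of_power (R1 : Int) (D1 : Int) (R2 : Int) (D2 : Int) (R3 : Int) (D3 : Int) (k : Int) : Int :=
  aLoop (2 ^ 40) [(D1, R1), (D2, R2), (D3, R3)] 0 0 0 k

-- ===== PORT B =====
-- Source B's `for day, r in events` loop with its early returns; on the inputs where
-- Source B raises ValueError (final rate ≤ 0 and k ≥ rate; excluded by Pre_, A loops
-- forever there) it returns days_on
def bLoop : List (Int × Int) → Int → Int → Int → Int → Int
  | [], days_on, _, rate, k =>
    if 0 < rate then days_on + max 1 (PySem.Int.floordiv k rate)
    else if k < rate then days_on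
    else days_on
  | (day, r) :: evs, days_on, start, rate, k =>
    if 0 < day - start ∧ 0 < rate then
      if max 1 (PySem.Int.floordiv k rate) ≤ day - start then
        days_on + max 1 (PySem.Int.floordiv k rate)
      else bLoop evs (days_on + (day - start)) day (rate + r) (k - (day - start) * rate)
    else if 0 < day - start ∧ k < rate then days_on
    else bLoop evs days_on day (rate + r) k

def get_days_of_power_alt (R1 : Int) (D1 : Int) (R2 : Int) (D2 : Int) (R3 : Int) (D3 : Int) (k : Int) : Int :=
  if k < 0 then 0
  else
    bLoop (PySem.List.sorted (([(D1, R1), (D2, R2), (D3, R3)]).filter (fun p => decide (0 ≤ p.1)))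
      (fun p => p.1) false) 0 0 0 k

-- ===== PRECONDITION & SPEC =====
-- closed-form termination test over the activation events sorted by day (days ≥ 0,
-- d1 ≤ d2 ≤ d3): the eventual total rate is positive, or the budget is exhausted at
-- a loop check inside one of the two constant-rate ramp-up segments
def preOf : List (Int × Int) → Int → Bool
  | [], _ => false
  | [(_, q1)], _ => decide (1 ≤ q1)
  | [(d1, q1), (d2, q2)], k =>
      decide (1 ≤ q1 + q2 ∨ (1 ≤ d2 - d1 ∧ 0 < q1 ∧ k < (d2 - d1 + 1) * q1))
  | [(d1, q1), (d2, q2), (d3, q3)], k =>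
      decide (1 ≤ q1 + q2 + q3 ∨
        (1 ≤ d2 - d1 ∧ 0 < q1 ∧ k < (d2 - d1 + 1) * q1) ∨
        (1 ≤ d3 - d2 ∧ 0 < q1 + q2 ∧
          k - (if 0 < q1 then (d2 - d1) * q1 else 0) < (d3 - d2 + 1) * (q1 + q2)))
  | _, _ => false

-- Pre_ holds exactly when A's while-loop terminates (k < 0, or the eventual total
-- rate of the loans activating on a day ≥ 0 is ≥ 1, or the budget is exhausted at a
-- check inside a ramp-up segment); on the excluded inputs A loops forever and
-- returns nothing (Source B raises ValueError there).
def Pre_get_days_of_power (R1 : Int) (D1 : Int) (R2 : Int) (D2 : Int) (R3 : Int) (D3 : Int) (k : Int) : Prop :=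
  k < 0 ∨ preOf (PySem.List.sorted (([(D1, R1), (D2, R2), (D3, R3)]).filter (fun p => decide (0 ≤ p.1)))
      (fun p => p.1) false) k = true
instance (R1 : Int) (D1 : Int) (R2 : Int) (D2 : Int) (R3 : Int) (D3 : Int) (k : Int) : Decidable (Pre_get_days_of_power R1 D1 R2 D2 R3 D3 k) := by unfold Pre_get_days_of_power; infer_instance

def pvWitness_get_days_of_power : Int × Int × Int × Int × Int × Int × Int := (1, 0, 1, 1, 1, 2, 10)

def Spec_get_days_of_power (R1 : Int) (D1 : Int) (R2 : Int) (D2 : Int) (R3 : Int) (D3 : Int) (k : Int) (out : Int) : Prop := out = get_days_of_power_alt R1 D1 R2 D2 R3 D3 k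
instance (R1 : Int) (D1 : Int) (R2 : Int) (D2 : Int) (R3 : Int) (D3 : Int) (k : Int) (out : Int) : Decidable (Spec_get_days_of_power R1 D1 R2 D2 R3 D3 k out) := by unfold Spec_get_days_of_power; infer_instance

-- ===== CLAIM (what is proved, stated in full; the proofs are below) =====
def Claim_equal_get_days_of_power : Prop := ∀ (R1 : Int) (D1 : Int) (R2 : Int) (D2 : Int) (R3 : Int) (D3 : Int) (k : Int), Dom_get_days_of_power R1 D1 R2 D2 R3 D3 k → Pre_get_days_of_power R1 D1 R2 D2 R3 D3 k → Spec_get_days_of_power R1 D1 R2 D2 R3 D3 k (get_days_of_power R1 D1 R2 D2 R3 D3 k)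

-- ===== LEMMAS AND PROOFS =====

-- sum of the rates of an event list
def sumR (l : List (Int × Int)) : Int := (l.map Prod.snd).sum

-- proof-side termination predicate: bLoop returns through a non-ValueError path
def TermB : List (Int × Int) → Int → Int → Int → Prop
  | [], _, r, k => 1 ≤ r ∨ k < r
  | (day, q) :: evs, start, r, k =>
    if 0 < day - start ∧ 0 < r then
      (max 1 (PySem.Int.floordiv k r) ≤ day - start) ∨ TermB evs day (r + q) (k - (day - start) * r)
    else if 0 < day - start ∧ k < r then True
    else TermB evs day (r + q) k

-- largest event day (with a base value)
def maxD (base : Int) (l : List (Int × Int)) : Int := (l.map Prod.fst).foldr max base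

theorem le_maxD_base (base : Int) (l : List (Int × Int)) : base ≤ maxD base l := by
  induction l with
  | nil => simp [maxD]
  | cons x xs ih => simp only [maxD, List.map_cons, List.foldr_cons] at *; omega

theorem le_maxD_mem (base : Int) (l : List (Int × Int)) (e : Int × Int) (he : e ∈ l) :
    e.1 ≤ maxD base l := by
  induction l with
  | nil => simp at he
  | cons x xs ih =>
    rcases List.mem_cons.mp he with h | h
    · subst h; simp only [maxD, List.map_cons, List.foldr_cons]; omega
    · have := ih h; simp only [maxD, List.map_cons, List.foldr_cons] at *; omega

theorem maxD_le (base b : Int) (l : List (Int × Int)) (hb : base ≤ b)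
    (h : ∀ e ∈ l, e.1 ≤ b) : maxD base l ≤ b := by
  induction l with
  | nil => simpa [maxD]
  | cons x xs ih =>
    have h1 := h x (by simp)
    have h2 : maxD base xs ≤ b := ih (fun e he => h e (List.mem_cons_of_mem _ he))
    simp only [maxD, List.map_cons, List.foldr_cons] at *; omega

theorem remove?_append_cons_self (pre xs : List (Int × Int)) (x : Int × Int) (h : x ∉ pre) :
    PySem.List.remove? (pre ++ x :: xs) x = some (pre ++ xs) := by
  induction pre with
  | nil => simp
  | cons y ys ih =>
    have hy : y ≠ x := fun hyx => h (hyx ▸ List.mem_cons_self)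
    have ih' := ih (fun hm => h (List.mem_cons_of_mem _ hm))
    rw [List.cons_append, PySem.List.remove?_cons_of_ne _ hy, ih']
    rfl

theorem act_go (t : Int) : ∀ (rest pre : List (Int × Int)) (r : Int),
    (∀ x ∈ pre, ¬ x.1 = t) →
    List.foldl
      (fun s loan =>
        if t = loan.1 then (s.1 + loan.2, ((PySem.List.remove? s.2 loan).getD s.2)) else s)
      (r, pre ++ rest) rest
    = (r + sumR (rest.filter (fun l => decide (l.1 = t))),
       pre ++ rest.filter (fun l => decide (¬ l.1 = t))) := by
  intro rest
  induction rest with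
  | nil => intro pre r _; simp [sumR]
  | cons x xs ih =>
    intro pre r hpre
    by_cases hx : x.1 = t
    · have hnotin : x ∉ pre := fun hm => hpre x hm hx
      have hrem := remove?_append_cons_self pre xs x hnotin
      simp only [List.foldl_cons, if_pos hx.symm, hrem, Option.getD_some]
      rw [ih pre (r + x.2) hpre]
      simp [sumR, hx]
      ring
    · have hstep : (pre ++ x :: xs) = ((pre ++ [x]) ++ xs) := by simp
      simp only [List.foldl_cons, if_neg (fun h : t = x.1 => hx h.symm)]
      rw [hstep, ih (pre ++ [x]) r (by
        intro y hy
        rcases List.mem_append.mp hy with h | h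
        · exact hpre y h
        · simp at h; subst h; exact hx)]
      simp [sumR, hx]

theorem aActivate_eq (loans : List (Int × Int)) (t r : Int) :
    aActivate loans t r
      = (r + sumR (loans.filter (fun l => decide (l.1 = t))),
         loans.filter (fun l => decide (¬ l.1 = t))) := by
  have := act_go t loans [] r (by simp)
  simpa [aActivate] using this

theorem aActivate_noact (loans : List (Int × Int)) (t r : Int)
    (h : ∀ l ∈ loans, ¬ l.1 = t) : aActivate loans t r = (r, loans) := by
  rw [aActivate_eq]
  have h1 : loans.filter (fun l => decide (l.1 = t)) = [] := by
    simp only [List.filter_eq_nil_iff]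
    intro a ha; simpa using h a ha
  have h2 : loans.filter (fun l => decide (¬ l.1 = t)) = loans := by
    rw [List.filter_eq_self]; intro a ha; simpa using h a ha
  simp only [h1, h2, sumR, List.map_nil, List.sum_nil, add_zero]

theorem aLoop_stop (fuel : Nat) (loans : List (Int × Int)) (rate t days k : Int)
    (h : k < rate) : aLoop fuel loans rate t days k = days := by
  cases fuel with
  | zero => rfl
  | succ f => simp [aLoop, not_le.mpr h]

-- steady state: no loan will ever activate again, positive rate: pure division
theorem aLoop_steady : ∀ (fuel : Nat) (loans : List (Int × Int)) (r t days k : Int),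
    0 < r → (∀ l ∈ loans, l.1 < t) → k.toNat < fuel →
    aLoop fuel loans r t days k = if k < r then days else days + k / r := by
  intro fuel
  induction fuel with
  | zero => intro _ _ _ _ k _ _ hf; omega
  | succ f ih =>
    intro loans r t days k hr hl hf
    by_cases hk : k < r
    · rw [aLoop_stop _ _ _ _ _ _ hk, if_pos hk]
    · rw [not_lt] at hk
      have hact := aActivate_noact loans t r (fun l hml => by have := hl l hml; omega)
      simp only [aLoop, if_pos (by omega : r ≤ k), hact, if_pos hr]
      rw [ih loans r (t + 1) (days + 1) (k - r) hr
        (fun l hml => by have := hl l hml; omega) (by omega)]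
      have hdiv : (k - r) / r = k / r - 1 := by
        have h0 := Int.add_mul_ediv_right k (-1) (by omega : r ≠ 0)
        rw [show k + -1 * r = k - r by ring] at h0
        omega
      have h1 : 1 ≤ k / r := by
        rw [Int.le_ediv_iff_mul_le hr]; omega
      by_cases h2 : k - r < r
      · have : k / r < 2 := by rw [Int.ediv_lt_iff_lt_mul hr]; omega
        rw [if_pos h2, if_neg (by omega)]; omega
      · have : 2 ≤ k / r := by rw [Int.le_ediv_iff_mul_le hr]; omega
        rw [if_neg h2, if_neg (by omega)]; omega

-- skip a window of gap activation-free days at non-positive rate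
theorem aLoop_skip : ∀ (gap fuel : Nat) (loans : List (Int × Int)) (r t days k : Int),
    r ≤ 0 → (∀ l ∈ loans, l.1 < t ∨ t + gap ≤ l.1) → gap ≤ fuel →
    aLoop fuel loans r t days k
      = if k < r then days else aLoop (fuel - gap) loans r (t + gap) days k := by
  intro gap
  induction gap with
  | zero =>
    intro fuel loans r t days k hr _ _
    by_cases hk : k < r
    · rw [if_pos hk, aLoop_stop _ _ _ _ _ _ hk]
    · rw [if_neg hk]; simp
  | succ g ih =>
    intro fuel loans r t days k hr hl hf
    obtain ⟨f, rfl⟩ : ∃ f, fuel = f + 1 := ⟨fuel - 1, by omega⟩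
    by_cases hk : k < r
    · rw [if_pos hk, aLoop_stop _ _ _ _ _ _ hk]
    · rw [if_neg hk]
      have hact := aActivate_noact loans t r (fun l hml => by
        have := hl l hml; push_cast at this ⊢; omega)
      simp only [aLoop, if_pos (by omega : r ≤ k), hact, if_neg (by omega : ¬ 0 < r)]
      rw [ih f loans r (t + 1) days k hr (fun l hml => by
        have := hl l hml; push_cast at this ⊢; omega) (by omega), if_neg hk]
      have harg : t + 1 + (g : Int) = t + ((g : Nat) + 1 : Nat) := by push_cast; ring
      rw [harg]
      congr 1
      omega

-- drain a window of gap activation-free days at positive rate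
theorem aLoop_drain : ∀ (gap fuel : Nat) (loans : List (Int × Int)) (r t days k : Int),
    0 < r → (∀ l ∈ loans, l.1 < t ∨ t + gap ≤ l.1) → gap ≤ fuel →
    aLoop fuel loans r t days k
      = if k < r then days
        else if k / r ≤ gap then days + k / r
        else aLoop (fuel - gap) loans r (t + gap) (days + gap) (k - gap * r) := by
  intro gap
  induction gap with
  | zero =>
    intro fuel loans r t days k hr _ _
    by_cases hk : k < r
    · rw [if_pos hk, aLoop_stop _ _ _ _ _ _ hk]
    · rw [if_neg hk]
      have h1 : 1 ≤ k / r := by rw [Int.le_ediv_iff_mul_le hr]; omega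
      rw [if_neg (by push_cast; omega)]
      simp
  | succ g ih =>
    intro fuel loans r t days k hr hl hf
    obtain ⟨f, rfl⟩ : ∃ f, fuel = f + 1 := ⟨fuel - 1, by omega⟩
    by_cases hk : k < r
    · rw [if_pos hk, aLoop_stop _ _ _ _ _ _ hk]
    · rw [if_neg hk]
      have hact := aActivate_noact loans t r (fun l hml => by
        have := hl l hml; push_cast at this ⊢; omega)
      simp only [aLoop, if_pos (by omega : r ≤ k), hact, if_pos hr]
      rw [ih f loans r (t + 1) (days + 1) (k - r) hr (fun l hml => by
        have := hl l hml; push_cast at this ⊢; omega) (by omega)]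
      have hdiv : (k - r) / r = k / r - 1 := by
        have h0 := Int.add_mul_ediv_right k (-1) (by omega : r ≠ 0)
        rw [show k + -1 * r = k - r by ring] at h0
        omega
      have h1 : 1 ≤ k / r := by rw [Int.le_ediv_iff_mul_le hr]; omega
      by_cases h2 : k - r < r
      · have : k / r < 2 := by rw [Int.ediv_lt_iff_lt_mul hr]; omega
        rw [if_pos h2, if_pos (by push_cast; omega)]
        omega
      · have h3 : 2 ≤ k / r := by rw [Int.le_ediv_iff_mul_le hr]; omega
        rw [if_neg h2]
        by_cases h4 : k / r - 1 ≤ (g : Int)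
        · rw [if_pos (by omega), if_pos (by push_cast; omega)]
          omega
        · rw [if_neg (by omega), if_neg (by push_cast; omega)]
          have harg : t + 1 + (g : Int) = t + ((g : Nat) + 1 : Nat) := by push_cast; ring
          have harg2 : days + 1 + (g : Int) = days + ((g : Nat) + 1 : Nat) := by push_cast; ring
          have harg3 : k - r - (g : Int) * r = k - ((g : Nat) + 1 : Nat) * r := by push_cast; ring
          rw [harg, harg2, harg3]
          congr 1
          omega

-- Source B consumes same-day activations through zero-length segments: they only accumulate the rate
theorem bLoop_block : ∀ (block rest : List (Int × Int)) (days s r k : Int),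
    (∀ e ∈ block, e.1 = s) →
    bLoop (block ++ rest) days s r k = bLoop rest days s (r + sumR block) k := by
  intro block
  induction block with
  | nil => intro rest days s r k _; simp [sumR]
  | cons e bs ih =>
    intro rest days s r k hb
    obtain ⟨d, q⟩ := e
    have hd : d = s := hb (d, q) (by simp)
    subst hd
    simp only [List.cons_append, bLoop, sub_self]
    rw [if_neg (by omega), if_neg (by omega)]
    rw [ih rest days d (r + q) k (fun e he => hb e (List.mem_cons_of_mem _ he))]
    simp [sumR]
    ring_nf

-- the fictitious start value -1 used to align A's first iteration is invisible to bLoop when k ≥ 0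
theorem bLoop_shift (evs : List (Int × Int)) (days k : Int) (hk : 0 ≤ k) :
    bLoop evs days (-1) 0 k = bLoop evs days 0 0 k := by
  cases evs with
  | nil => rfl
  | cons e t =>
    obtain ⟨d, q⟩ := e
    simp only [bLoop]
    rw [if_neg (by omega), if_neg (by omega), if_neg (by omega), if_neg (by omega)]

theorem sumR_cons (e : Int × Int) (l : List (Int × Int)) : sumR (e :: l) = e.2 + sumR l := by
  simp [sumR]

-- the TermB analogue of bLoop_block
theorem TermB_block : ∀ (block rest : List (Int × Int)) (d r k : Int),
    (∀ e ∈ block, e.1 = d) → TermB (block ++ rest) d r k → TermB rest d (r + sumR block) k := by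
  intro block
  induction block with
  | nil => intro rest d r k _ h; simpa [sumR] using h
  | cons e bs ih =>
    intro rest d r k hb h
    obtain ⟨dd, q⟩ := e
    have hdd : dd = d := hb (dd, q) (by simp)
    rw [List.cons_append, TermB, hdd, sub_self] at h
    rw [if_neg (by omega), if_neg (by omega)] at h
    have := ih rest d (r + q) k (fun e he => hb e (List.mem_cons_of_mem _ he)) h
    rw [sumR_cons, ← add_assoc]
    exact this

-- an eventual positive total rate always terminates
theorem TermB_of_rate : ∀ (evs : List (Int × Int)) (start r k : Int),
    1 ≤ r + sumR evs → TermB evs start r k := by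
  intro evs
  induction evs with
  | nil => intro start r k h; simp only [TermB]; left; simpa [sumR] using h
  | cons e tl ih =>
    intro start r k h
    obtain ⟨d, q⟩ := e
    have h' : 1 ≤ r + q + sumR tl := by simp [sumR_cons] at h; omega
    rw [TermB]
    split_ifs with h1 h2
    · right; exact ih d (r + q) _ h'
    · exact ih d (r + q) k h'

-- floor division bound used for the exhaustion exits
theorem fdiv_le_of_lt (k L r : Int) (hr : 0 < r) (h : k < (L + 1) * r) :
    PySem.Int.floordiv k r ≤ L := by
  rw [PySem.Int.floordiv_eq_ediv_of_pos hr]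
  have := (Int.ediv_lt_iff_lt_mul hr (a := k) (b := L + 1)).mpr h
  omega

theorem dropWhile_head_not {alpha : Type} (p : alpha → Bool) :
    ∀ (l : List alpha) (x : alpha) (xs : List alpha), l.dropWhile p = x :: xs → ¬ p x = true := by
  intro l
  induction l with
  | nil => intro x xs h; simp [List.dropWhile] at h
  | cons a t ih =>
    intro x xs h
    by_cases hp : p a = true
    · rw [List.dropWhile_cons_of_pos hp] at h; exact ih x xs h
    · rw [List.dropWhile_cons_of_neg hp] at h
      injection h with h1 h2
      exact h1 ▸ hp

-- base case of the main lemma: no future activations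
theorem M2_nil (loans : List (Int × Int)) (r start days k : Int) (fuel : Nat)
    (hperm : (loans.filter (fun l => decide (start < l.1))).Perm [])
    (hnil : 1 ≤ r ∨ k < r) (hfuel : k.toNat < fuel) :
    (if 0 < r then aLoop fuel loans r (start + 1) (days + 1) (k - r)
     else aLoop fuel loans r (start + 1) days k) = bLoop [] days start r k := by
  have hnilf : loans.filter (fun l => decide (start < l.1)) = [] := hperm.eq_nil
  have hl : ∀ l ∈ loans, l.1 < start + 1 := by
    intro l hml
    by_contra hcon
    have hmem : l ∈ loans.filter (fun l => decide (start < l.1)) :=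
      List.mem_filter.mpr ⟨hml, by simp; omega⟩
    rw [hnilf] at hmem; simp at hmem
  by_cases hr : 0 < r
  · rw [if_pos hr, aLoop_steady fuel loans r (start + 1) (days + 1) (k - r) hr hl (by omega)]
    simp only [bLoop, if_pos hr, PySem.Int.floordiv_eq_ediv_of_pos hr]
    have hdiv : (k - r) / r = k / r - 1 := by
      have h0 := Int.add_mul_ediv_right k (-1) (by omega : r ≠ 0)
      rw [show k + -1 * r = k - r by ring] at h0
      omega
    by_cases hk : k < r
    · have hlt : k / r < 1 := by rw [Int.ediv_lt_iff_lt_mul hr]; omega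
      rw [if_pos (by omega : k - r < r), max_eq_left (by omega)]
    · have h1 : 1 ≤ k / r := by rw [Int.le_ediv_iff_mul_le hr]; omega
      rw [max_eq_right h1]
      by_cases h2 : k - r < r
      · have : k / r < 2 := by rw [Int.ediv_lt_iff_lt_mul hr]; omega
        rw [if_pos h2]; omega
      · rw [if_neg h2]; omega
  · have hk2 : k < r := hnil.resolve_left (by omega)
    rw [if_neg hr, aLoop_stop _ _ _ _ _ _ hk2]
    simp only [bLoop]
    rw [if_neg hr, if_pos hk2]

-- MAIN LEMMA: A's loop, observed right after the activation-and-payment of day `start`,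
-- equals Source B's segment loop over the remaining (sorted) activation events, assuming
-- the termination condition TermB
theorem M2 : ∀ (n : Nat) (evs loans : List (Int × Int)) (r start days k : Int) (fuel : Nat),
    evs.length ≤ n →
    (loans.filter (fun l => decide (start < l.1))).Perm evs →
    List.Pairwise (fun a b => a.1 ≤ b.1) evs →
    (∀ e ∈ evs, start < e.1) →
    TermB evs start r k →
    (maxD start evs - start).toNat + k.toNat < fuel →
    (if 0 < r then aLoop fuel loans r (start + 1) (days + 1) (k - r)
     else aLoop fuel loans r (start + 1) days k) = bLoop evs days start r k := by
  intro n
  induction n with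
  | zero =>
    intro evs loans r start days k fuel hlen hperm _ _ hterm hfuel
    have hevs : evs = [] := by cases evs with | nil => rfl | cons _ _ => simp at hlen
    subst hevs
    exact M2_nil loans r start days k fuel hperm (by simpa only [TermB] using hterm)
      (by simpa [maxD] using hfuel)
  | succ m ih =>
    intro evs loans r start days k fuel hlen hperm hpair hgt hterm hfuel
    cases evs with
    | nil =>
      exact M2_nil loans r start days k fuel hperm (by simpa only [TermB] using hterm)
        (by simpa [maxD] using hfuel)
    | cons e evs' =>
      obtain ⟨d, q⟩ := e
      have hd : start < d := hgt (d, q) List.mem_cons_self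
      set tb := evs'.takeWhile (fun e => decide (e.1 = d)) with htb
      set rest := evs'.dropWhile (fun e => decide (e.1 = d)) with hrest
      have hsplit : evs' = tb ++ rest := (List.takeWhile_append_dropWhile).symm
      have htbd : ∀ e ∈ tb, e.1 = d := fun e he => by
        simpa using List.mem_takeWhile_imp he
      have hall' : ∀ e ∈ evs', d ≤ e.1 := by
        have := (List.pairwise_cons.mp hpair).1
        exact fun e he => this e he
      have hpair' : List.Pairwise (fun a b : Int × Int => a.1 ≤ b.1) rest :=
        ((List.pairwise_cons.mp hpair).2).sublist (List.dropWhile_sublist _)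
      have hrest_gt : ∀ e ∈ rest, d < e.1 := by
        cases hr0 : rest with
        | nil => intro e he; exact absurd he (by simp)
        | cons x xs =>
          have hxne : ¬ x.1 = d := by
            have := dropWhile_head_not (fun e : Int × Int => decide (e.1 = d)) evs' x xs
              (by rw [← hrest, hr0])
            simpa using this
          have hxmem : x ∈ evs' := (List.dropWhile_sublist _).subset
            (by rw [← hrest, hr0]; exact List.mem_cons_self)
          have hxd : d < x.1 := lt_of_le_of_ne (hall' x hxmem) (fun h => hxne h.symm)
          intro e he
          rcases List.mem_cons.mp he with h | h
          · subst h; exact hxd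
          · have hp := hpair'; rw [hr0] at hp
            have := (List.pairwise_cons.mp hp).1 e h
            omega
      -- filter characterisations on the event side
      have hfd : ((d, q) :: evs').filter (fun e => decide (e.1 = d)) = (d, q) :: tb := by
        rw [hsplit, List.filter_cons, List.filter_append]
        have h1 : tb.filter (fun e => decide (e.1 = d)) = tb :=
          List.filter_eq_self.mpr (fun e he => by simpa using htbd e he)
        have h2 : rest.filter (fun e => decide (e.1 = d)) = [] :=
          List.filter_eq_nil_iff.mpr (fun e he => by have := hrest_gt e he; simp; omega)
        simp [h1, h2]
      have hfrest : ((d, q) :: evs').filter (fun e => decide (d < e.1)) = rest := by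
        rw [hsplit, List.filter_cons, List.filter_append]
        have h1 : tb.filter (fun e => decide (d < e.1)) = [] :=
          List.filter_eq_nil_iff.mpr (fun e he => by have := htbd e he; simp; omega)
        have h2 : rest.filter (fun e => decide (d < e.1)) = rest :=
          List.filter_eq_self.mpr (fun e he => by have := hrest_gt e he; simp; omega)
        simp [h1, h2]
      -- loan-side facts
      have hmemev : ∀ l ∈ loans, start < l.1 → l.1 = d ∨ d < l.1 := by
        intro l hml hgt'
        have : l ∈ (d, q) :: evs' := hperm.mem_iff.mp
          (List.mem_filter.mpr ⟨hml, by simp; omega⟩)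
        rcases List.mem_cons.mp this with h | h
        · left; rw [h]
        · have := hall' l h; omega
      set gap : Nat := (d - start - 1).toNat with hgap
      have hcastgap : ((gap : Nat) : Int) = d - start - 1 := Int.toNat_of_nonneg (by omega)
      have hwindow : ∀ l ∈ loans, l.1 < start + 1 ∨ start + 1 + (gap : Int) ≤ l.1 := by
        intro l hml
        by_cases hc : start < l.1
        · rcases hmemev l hml hc with h | h <;> [skip; skip] <;> right <;> omega
        · left; omega
      -- maxD bookkeeping
      have hdmax : d ≤ maxD start ((d, q) :: evs') :=
        le_maxD_mem _ _ _ List.mem_cons_self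
      have hstartmax : start ≤ maxD start ((d, q) :: evs') := le_maxD_base _ _
      have hrestmax : d ≤ maxD d rest := le_maxD_base _ _
      have hmax' : maxD d rest ≤ maxD start ((d, q) :: evs') :=
        maxD_le _ _ _ hdmax (fun e he => le_maxD_mem _ _ _
          (by rw [hsplit]; exact List.mem_cons_of_mem _ (List.mem_append_right _ he)))
      have hgapfuel : gap ≤ fuel := by omega
      -- the activation-and-payment of day d followed by the induction hypothesis
      have hstep : ∀ (fuel₂ : Nat) (days₂ k₂ : Int),
          r ≤ k₂ →
          TermB rest d (r + q + sumR tb) k₂ →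
          (maxD start ((d, q) :: evs') - d).toNat + k₂.toNat + 1 < fuel₂ →
          aLoop fuel₂ loans r d days₂ k₂ = bLoop rest days₂ d (r + q + sumR tb) k₂ := by
        intro fuel₂ days₂ k₂ hk₂ hterm₂ hfuel₂
        obtain ⟨f₂, rfl⟩ : ∃ f₂, fuel₂ = f₂ + 1 := ⟨fuel₂ - 1, by omega⟩
        have hsum : sumR (loans.filter (fun l => decide (l.1 = d))) = q + sumR tb := by
          have e1 : (loans.filter (fun l => decide (start < l.1))).filter
              (fun l => decide (l.1 = d)) = loans.filter (fun l => decide (l.1 = d)) := by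
            rw [List.filter_filter]
            exact List.filter_congr (fun x _ => by
              by_cases hx : x.1 = d <;> simp [hx] <;> omega)
          have e2 := (hperm.filter (fun l : Int × Int => decide (l.1 = d)))
          rw [e1, hfd] at e2
          have := (e2.map Prod.snd).sum_eq
          simpa [sumR] using this
        have hperm₂ : ((loans.filter (fun l => decide (¬ l.1 = d))).filter
            (fun l => decide (d < l.1))).Perm rest := by
          have e1 : (loans.filter (fun l => decide (¬ l.1 = d))).filter
              (fun l => decide (d < l.1)) = loans.filter (fun l => decide (d < l.1)) := by
            rw [List.filter_filter]
            exact List.filter_congr (fun x _ => by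
              by_cases hx : d < x.1 <;> simp [hx] <;> omega)
          have e2 : (loans.filter (fun l => decide (start < l.1))).filter
              (fun l => decide (d < l.1)) = loans.filter (fun l => decide (d < l.1)) := by
            rw [List.filter_filter]
            exact List.filter_congr (fun x _ => by
              by_cases hx : d < x.1 <;> simp [hx] <;> omega)
          rw [e1, ← e2]
          have := hperm.filter (fun l : Int × Int => decide (d < l.1))
          rwa [hfrest] at this
        simp only [aLoop, if_pos hk₂, aActivate_eq loans d r, hsum]
        have hr₂ : r + (q + sumR tb) = r + q + sumR tb := by ring
        rw [hr₂]
        have hlen₂ : rest.length ≤ m := by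
          have h5 : evs'.length = tb.length + rest.length := by
            rw [hsplit, List.length_append]
          have h6 := hlen
          simp only [List.length_cons] at h6
          omega
        have hfuel₂' : (maxD d rest - d).toNat + k₂.toNat < f₂ := by omega
        exact ih rest (loans.filter (fun l => decide (¬ l.1 = d))) (r + q + sumR tb) d
          days₂ k₂ f₂ hlen₂ hperm₂ hpair' hrest_gt hterm₂ hfuel₂'
      -- now the two rate regimes over the segment [start+1, d)
      by_cases hr : 0 < r
      · rw [if_pos hr,
          aLoop_drain gap fuel loans r (start + 1) (days + 1) (k - r) hr hwindow hgapfuel]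
        have hdiv : (k - r) / r = k / r - 1 := by
          have h0 := Int.add_mul_ediv_right k (-1) (by omega : r ≠ 0)
          rw [show k + -1 * r = k - r by ring] at h0
          omega
        simp only [bLoop, if_pos (show 0 < d - start ∧ 0 < r from ⟨by omega, hr⟩),
          PySem.Int.floordiv_eq_ediv_of_pos hr]
        by_cases hkr : k < r
        · have hlt : k / r < 1 := by rw [Int.ediv_lt_iff_lt_mul hr]; omega
          rw [if_pos (by omega : k - r < r), max_eq_left (by omega),
            if_pos (by omega : (1:Int) ≤ d - start)]
        · have h1 : 1 ≤ k / r := by rw [Int.le_ediv_iff_mul_le hr]; omega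
          rw [max_eq_right h1]
          by_cases hjL : k / r ≤ d - start
          · rw [if_pos hjL]
            by_cases h2 : k - r < r
            · have : k / r < 2 := by rw [Int.ediv_lt_iff_lt_mul hr]; omega
              rw [if_pos h2]; omega
            · rw [if_neg h2, if_pos (by omega : (k - r) / r ≤ (gap : Int))]; omega
          · rw [if_neg hjL]
            have hbr : (d - start + 1) * r ≤ k := by
              rw [← Int.le_ediv_iff_mul_le hr]; omega
            have hexp : (d - start + 1) * r = (d - start) * r + r := by ring
            have h2 : ¬ k - r < r := by
              have h2r : 2 * r ≤ (d - start + 1) * r :=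
                mul_le_mul_of_nonneg_right (by omega) (by omega)
              omega
            rw [if_neg h2, if_neg (by omega : ¬ (k - r) / r ≤ (gap : Int))]
            have e1 : start + 1 + (gap : Int) = d := by omega
            have e2 : days + 1 + (gap : Int) = days + (d - start) := by omega
            have e3 : k - r - (gap : Int) * r = k - (d - start) * r := by
              rw [hcastgap]; ring
            rw [e1, e2, e3]
            have hk₂ : r ≤ k - (d - start) * r := by omega
            have hLr : d - start ≤ (d - start) * r :=
              le_mul_of_one_le_right (by omega) (by omega)
            have hkb : k - (d - start) * r ≤ k - (d - start) := by omega
            have hkk : 1 ≤ k - (d - start) * r := by omega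
            -- termination condition for the remaining events
            have htail : TermB (tb ++ rest) d (r + q) (k - (d - start) * r) := by
              have h0 := hterm
              simp only [TermB] at h0
              rw [if_pos (show 0 < d - start ∧ 0 < r from ⟨by omega, hr⟩),
                PySem.Int.floordiv_eq_ediv_of_pos hr, max_eq_right h1, hsplit] at h0
              exact h0.resolve_left hjL
            have hterm₂ := TermB_block tb rest d (r + q) (k - (d - start) * r) htbd htail
            rw [hstep (fuel - gap) (days + (d - start)) (k - (d - start) * r) hk₂ hterm₂
              (by omega)]
            rw [hsplit, bLoop_block tb rest _ _ _ _ htbd]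
      · rw [if_neg hr,
          aLoop_skip gap fuel loans r (start + 1) days k (by omega) hwindow hgapfuel]
        simp only [bLoop, if_neg (show ¬ (0 < d - start ∧ 0 < r) from fun h => hr h.2)]
        by_cases hkr : k < r
        · simp only [if_pos hkr, if_pos (show 0 < d - start ∧ k < r from ⟨by omega, hkr⟩)]
        · rw [if_neg hkr, if_neg (show ¬ (0 < d - start ∧ k < r) from fun h => hkr h.2)]
          have e1 : start + 1 + (gap : Int) = d := by omega
          have htail : TermB (tb ++ rest) d (r + q) k := by
            have h0 := hterm
            simp only [TermB] at h0
            rw [if_neg (show ¬ (0 < d - start ∧ 0 < r) from fun h => hr h.2),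
              if_neg (show ¬ (0 < d - start ∧ k < r) from fun h => hkr h.2), hsplit] at h0
            exact h0
          have hterm₂ := TermB_block tb rest d (r + q) k htbd htail
          rw [e1, hstep (fuel - gap) days k (by omega) hterm₂ (by omega)]
          rw [hsplit, bLoop_block tb rest _ _ _ _ htbd]

-- GLUE: the closed-form precondition implies the termination predicate on the
-- sorted event list (length ≤ 3, sorted, days ≥ 0, budget ≥ 0)
theorem glue (evs : List (Int × Int)) (k : Int) (hlen : evs.length ≤ 3)
    (hsort : List.Pairwise (fun a b : Int × Int => a.1 ≤ b.1) evs)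
    (hnn : ∀ e ∈ evs, 0 ≤ e.1) (hk : 0 ≤ k) (hp : preOf evs k = true) :
    TermB evs (-1) 0 k := by
  rcases evs with _ | ⟨⟨d1, q1⟩, _ | ⟨⟨d2, q2⟩, _ | ⟨⟨d3, q3⟩, _ | ⟨e4, tl⟩⟩⟩⟩
  · simp [preOf] at hp
  · -- one event: termination iff its rate is positive
    simp only [preOf, decide_eq_true_eq] at hp
    rw [TermB]
    rw [if_neg (by omega), if_neg (by omega)]
    rw [TermB]
    left; omega
  · -- two events
    simp only [preOf, decide_eq_true_eq] at hp
    rw [TermB]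
    rw [if_neg (by omega), if_neg (by omega), zero_add]
    rcases hp with hS | ⟨hL, hq, hkk⟩
    · apply TermB_of_rate
      simp [sumR]; omega
    · rw [TermB]
      rw [if_pos (show 0 < d2 - d1 ∧ 0 < q1 from ⟨by omega, hq⟩)]
      left
      have h2 := fdiv_le_of_lt k (d2 - d1) q1 hq hkk
      exact max_le (by omega) (by omega)
  · -- three events
    simp only [preOf, decide_eq_true_eq] at hp
    simp only [List.pairwise_cons] at hsort
    have hd12 : d1 ≤ d2 := hsort.1 (d2, q2) (by simp)
    rw [TermB]
    rw [if_neg (by omega), if_neg (by omega), zero_add]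
    rcases hp with hS | ⟨hL, hq, hkk⟩ | ⟨hL2, hs2, hkk⟩
    · apply TermB_of_rate
      simp [sumR]; omega
    · rw [TermB]
      rw [if_pos (show 0 < d2 - d1 ∧ 0 < q1 from ⟨by omega, hq⟩)]
      left
      have h2 := fdiv_le_of_lt k (d2 - d1) q1 hq hkk
      exact max_le (by omega) (by omega)
    · by_cases hq1 : 0 < q1
      · rw [if_pos hq1] at hkk
        by_cases hL1 : 0 < d2 - d1
        · rw [TermB]
          rw [if_pos (show 0 < d2 - d1 ∧ 0 < q1 from ⟨hL1, hq1⟩)]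
          right
          rw [TermB]
          rw [if_pos (show 0 < d3 - d2 ∧ 0 < q1 + q2 from ⟨by omega, hs2⟩)]
          left
          have h2 := fdiv_le_of_lt (k - (d2 - d1) * q1) (d3 - d2) (q1 + q2) hs2 hkk
          exact max_le (by omega) (by omega)
        · have hd : d2 - d1 = 0 := by omega
          rw [hd, zero_mul, sub_zero] at hkk
          rw [TermB]
          rw [if_neg (by omega), if_neg (by omega)]
          rw [TermB]
          rw [if_pos (show 0 < d3 - d2 ∧ 0 < q1 + q2 from ⟨by omega, hs2⟩)]
          left
          have h2 := fdiv_le_of_lt k (d3 - d2) (q1 + q2) hs2 hkk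
          exact max_le (by omega) (by omega)
      · rw [if_neg hq1, sub_zero] at hkk
        rw [TermB]
        rw [if_neg (fun h => hq1 h.2), if_neg (by omega)]
        rw [TermB]
        rw [if_pos (show 0 < d3 - d2 ∧ 0 < q1 + q2 from ⟨by omega, hs2⟩)]
        left
        have h2 := fdiv_le_of_lt k (d3 - d2) (q1 + q2) hs2 hkk
        exact max_le (by omega) (by omega)
  · simp at hlen; omega

theorem get_days_of_power_assemble (R1 D1 R2 D2 R3 D3 k : Int)
    (hdom : Dom_get_days_of_power R1 D1 R2 D2 R3 D3 k)
    (hpre : Pre_get_days_of_power R1 D1 R2 D2 R3 D3 k) :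
    get_days_of_power R1 D1 R2 D2 R3 D3 k = get_days_of_power_alt R1 D1 R2 D2 R3 D3 k := by
  simp only [Dom_get_days_of_power, pvDomInt, Bool.and_eq_true, decide_eq_true_eq] at hdom
  obtain ⟨⟨⟨⟨⟨⟨hR1, hD1⟩, hR2⟩, hD2⟩, hR3⟩, hD3⟩, hk'⟩ := hdom
  unfold Pre_get_days_of_power at hpre
  unfold get_days_of_power get_days_of_power_alt
  by_cases hk : k < 0
  · rw [if_pos hk]
    exact aLoop_stop _ _ _ _ _ _ hk
  · rw [if_neg hk]
    set evs := PySem.List.sorted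
      (([(D1, R1), (D2, R2), (D3, R3)]).filter (fun p => decide (0 ≤ p.1)))
      (fun p => p.1) false with hevs
    have hpreOf : preOf evs k = true := hpre.resolve_left hk
    have hfc : ([(D1, R1), (D2, R2), (D3, R3)]).filter (fun l => decide ((-1:Int) < l.1))
        = ([(D1, R1), (D2, R2), (D3, R3)]).filter (fun p => decide (0 ≤ p.1)) :=
      List.filter_congr (fun x _ => decide_eq_decide.mpr (by omega))
    have hperm : (([(D1, R1), (D2, R2), (D3, R3)]).filter
        (fun l => decide ((-1:Int) < l.1))).Perm evs := by
      rw [hfc]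
      exact (PySem.List.sorted_perm _ _ _).symm
    have hmemloans : ∀ e ∈ evs, e ∈ [(D1, R1), (D2, R2), (D3, R3)] ∧ 0 ≤ e.1 := by
      intro e he
      have := (PySem.List.mem_sorted _ _ _ _).mp he
      have h2 := List.mem_filter.mp this
      exact ⟨h2.1, by simpa using h2.2⟩
    have hgt : ∀ e ∈ evs, (-1 : Int) < e.1 := fun e he => by
      have := (hmemloans e he).2; omega
    have hlen3 : evs.length ≤ 3 := by
      have hpl := hperm.length_eq
      have h2 := List.length_filter_le (fun l : Int × Int => decide ((-1:Int) < l.1))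
        [(D1, R1), (D2, R2), (D3, R3)]
      simp only [List.length_cons, List.length_nil] at h2
      omega
    have hterm : TermB evs (-1) 0 k :=
      glue evs k hlen3 (PySem.List.sorted_pairwise _ _)
        (fun e he => (hmemloans e he).2) (by omega) hpreOf
    have hfuel : (maxD (-1) evs - (-1)).toNat + k.toNat < 2 ^ 40 := by
      have hb : maxD (-1) evs ≤ 2147483648 := by
        refine maxD_le _ _ _ (by norm_num) (fun e he => ?_)
        have hmem := (hmemloans e he).1
        simp only [List.mem_cons, List.not_mem_nil, or_false] at hmem
        rcases hmem with h | h | h <;> rw [h] <;> omega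
      have hpow : (2 : Nat) ^ 40 = 1099511627776 := by norm_num
      omega
    have hm2 := M2 evs.length evs [(D1, R1), (D2, R2), (D3, R3)] 0 (-1) 0 k (2 ^ 40)
      le_rfl hperm (PySem.List.sorted_pairwise _ _) hgt hterm hfuel
    norm_num at hm2
    rw [show (2 : Nat) ^ 40 = 1099511627776 by norm_num, hm2]
    exact bLoop_shift evs 0 k (by omega)

-- ===== VERDICT (by name: the statement is the Claim_ definition above) =====
theorem get_days_of_power_spec : Claim_equal_get_days_of_power := by
  intro R1 D1 R2 D2 R3 D3 k hdom hpre
  exact get_days_of_power_assemble R1 D1 R2 D2 R3 D3 k hdom hpre
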